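-- pv_equiv track=rewrite | github.com/anik120/Algorithms | juarez_travelling.py | steps_by_juarez
-- ===== SOURCE A (Python) =====
-- def steps_by_juarez(city1, city2, direction, N):
-- 	no_of_steps = 0
--
-- 	while city1 != city2:
-- 		if direction == "R":
-- 			city1 = (city1 + 1) % N
-- 		else:
-- 			city1 = (city1 -1 + N) % N
-- 		no_of_steps += 1
--
-- 	return no_of_steps
-- ===== SOURCE B (Python) =====
-- def steps_by_juarez(city1, city2, direction, N):
-- 	if direction == "R":
-- 		return (city2 - city1) % N
-- 	else:
-- 		return (city1 - city2) % N
-- ===== Notes on version B (the rewrite author's own statement) =====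
-- stated objective: faster
-- what changed: Replaced the step-by-step walk around the ring with a closed-form modular formula ((city2-city1)%N going right, (city1-city2)%N going left), intended as faster: O(1) instead of O(N) loop iterations.
-- outside the precondition, e.g. on steps_by_juarez(7, 7, 'R', 0): A returns 0, B raises ZeroDivisionError; on steps_by_juarez(0, -2, 'R', -3): A returns 1, B returns -2; on steps_by_juarez(8, 3, 'R', 5): A returns 5, B returns 0
import Mathlib
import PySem

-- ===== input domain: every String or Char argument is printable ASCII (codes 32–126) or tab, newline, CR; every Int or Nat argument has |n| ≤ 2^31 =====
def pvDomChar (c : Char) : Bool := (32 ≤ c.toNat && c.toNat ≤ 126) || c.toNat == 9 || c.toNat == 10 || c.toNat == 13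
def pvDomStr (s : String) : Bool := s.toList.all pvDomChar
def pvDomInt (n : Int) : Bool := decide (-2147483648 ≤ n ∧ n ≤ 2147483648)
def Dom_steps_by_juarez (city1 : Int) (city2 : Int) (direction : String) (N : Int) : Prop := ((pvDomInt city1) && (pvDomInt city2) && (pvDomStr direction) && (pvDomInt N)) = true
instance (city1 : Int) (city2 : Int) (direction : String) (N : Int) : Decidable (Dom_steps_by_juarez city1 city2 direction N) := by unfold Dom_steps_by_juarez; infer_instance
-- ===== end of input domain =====

-- B replaces A's step-by-step ring walk with a closed-form modular formula, intended as faster (constant work instead of one loop iteration per step).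


-- ===== PORT A =====
-- the while-loop of A, as fuel-indexed structural recursion over the same state
-- (city1, no_of_steps); inside Pre_ the loop makes fewer than N iterations, so
-- fuel N.toNat is never exhausted there.
def stepsLoopA (city2 : Int) (direction : String) (N : Int) : Nat → Int → Int → Int
  | 0, _, no_of_steps => no_of_steps
  | fuel + 1, city1, no_of_steps =>
    if city1 ≠ city2 then
      stepsLoopA city2 direction N fuel
        (if direction == "R" then PySem.Int.mod (city1 + 1) N
         else PySem.Int.mod (city1 - 1 + N) N)
        (no_of_steps + 1)
    else no_of_steps

def steps_by_juarez (city1 : Int) (city2 : Int) (direction : String) (N : Int) : Int :=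
  stepsLoopA city2 direction N N.toNat city1 0

-- ===== PORT B =====
def steps_by_juarez_alt (city1 : Int) (city2 : Int) (direction : String) (N : Int) : Int :=
  if direction == "R" then PySem.Int.mod (city2 - city1) N
  else PySem.Int.mod (city1 - city2) N

-- ===== PRECONDITION & SPEC =====
-- Pre_ admits the inputs on which A terminates AND its walk is the intended ring
-- walk: either city1 = city2 (N ≠ 0 only names a ring), or a positive ring N with
-- the target city2 in [0, N) and city1 not congruent to city2 (mod N).  Excluded
-- inputs where A still returns are accidents of Python's %: N < 0 (A walks the
-- negative residues), and city1 ≠ city2 with N ∣ city2 - city1 (A returns N only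
-- because its first step re-enters the ring); there B legitimately differs.
def Pre_steps_by_juarez (city1 : Int) (city2 : Int) (direction : String) (N : Int) : Prop :=
  (city1 = city2 ∧ N ≠ 0) ∨
  (0 < N ∧ 0 ≤ city2 ∧ city2 < N ∧ ¬ (N ∣ city2 - city1))
instance (city1 : Int) (city2 : Int) (direction : String) (N : Int) : Decidable (Pre_steps_by_juarez city1 city2 direction N) := by unfold Pre_steps_by_juarez; infer_instance

def pvWitness_steps_by_juarez : Int × Int × String × Int := (2, 5, "L", 7)

def Spec_steps_by_juarez (city1 : Int) (city2 : Int) (direction : String) (N : Int) (out : Int) : Prop := out = steps_by_juarez_alt city1 city2 direction N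
instance (city1 : Int) (city2 : Int) (direction : String) (N : Int) (out : Int) : Decidable (Spec_steps_by_juarez city1 city2 direction N out) := by unfold Spec_steps_by_juarez; infer_instance

-- ===== CLAIM (what is proved, stated in full; the proofs are below) =====
def Claim_equal_steps_by_juarez : Prop := ∀ (city1 : Int) (city2 : Int) (direction : String) (N : Int), Dom_steps_by_juarez city1 city2 direction N → Pre_steps_by_juarez city1 city2 direction N → Spec_steps_by_juarez city1 city2 direction N (steps_by_juarez city1 city2 direction N)

-- ===== LEMMAS AND PROOFS =====

-- Characterisation of Int.emod on the window (-N, N).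
theorem emod_small (x N : Int) (h1 : -N < x) (h2 : x < N) :
    x % N = if 0 ≤ x then x else x + N := by
  split_ifs with h
  · exact Int.emod_eq_of_lt h h2
  · rw [← Int.add_mul_emod_self_left x N 1, mul_one]
    exact Int.emod_eq_of_lt (by omega) (by omega)

-- Same characterisation with the right end of the window included.
theorem emod_small' (x N : Int) (h1 : 0 < x) (h2 : x ≤ N) :
    x % N = if x = N then 0 else x := by
  split_ifs with h
  · simp [h]
  · exact Int.emod_eq_of_lt (by omega) (by omega)

-- Loop invariant: with cities inside the ring and enough fuel, the loop adds
-- exactly B's closed-form step count to the accumulator.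
theorem stepsLoopA_eq (city2 : Int) (direction : String) (N : Int)
    (hN : 0 < N) (hc2l : 0 ≤ city2) (hc2u : city2 < N) :
    ∀ (fuel : Nat) (city1 steps : Int), 0 ≤ city1 → city1 < N →
      (steps_by_juarez_alt city1 city2 direction N).toNat ≤ fuel →
      stepsLoopA city2 direction N fuel city1 steps
        = steps + steps_by_juarez_alt city1 city2 direction N := by
  intro fuel
  induction fuel with
  | zero =>
    intro city1 steps h1 h2 hfuel
    have hnn : 0 ≤ steps_by_juarez_alt city1 city2 direction N := by
      unfold steps_by_juarez_alt
      split <;> exact PySem.Int.mod_nonneg _ hN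
    have : steps_by_juarez_alt city1 city2 direction N = 0 := by omega
    simp [stepsLoopA, this]
  | succ fuel ih =>
    intro city1 steps h1 h2 hfuel
    by_cases hne : city1 = city2
    · subst hne
      have : steps_by_juarez_alt city1 city1 direction N = 0 := by
        unfold steps_by_juarez_alt
        split <;> simp [PySem.Int.mod_eq_emod_of_pos hN]
      simp [stepsLoopA, this]
    · have hmod : ∀ a : Int, PySem.Int.mod a N = a % N := fun a => PySem.Int.mod_eq_emod_of_pos hN
      set city1' : Int :=
        if direction == "R" then PySem.Int.mod (city1 + 1) N
        else PySem.Int.mod (city1 - 1 + N) N with hc1'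
      have key : (0 ≤ city1' ∧ city1' < N) ∧
          steps_by_juarez_alt city1' city2 direction N
            = steps_by_juarez_alt city1 city2 direction N - 1 ∧
          1 ≤ steps_by_juarez_alt city1 city2 direction N := by
        unfold steps_by_juarez_alt
        by_cases hd : direction == "R"
        · simp only [hc1', if_pos hd, hmod _]
          rw [emod_small' (city1 + 1) N (by omega) (by omega),
                emod_small (city2 - city1) N (by omega) (by omega)]
          split_ifs <;>
          · rw [emod_small _ N (by omega) (by omega)]
            split_ifs <;> omega
        · simp only [hc1', if_neg hd, hmod _]
          rw [show city1 - 1 + N = city1 - 1 + N * 1 by ring,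
                Int.add_mul_emod_self_left,
                emod_small (city1 - 1) N (by omega) (by omega),
                emod_small (city1 - city2) N (by omega) (by omega)]
          split_ifs <;>
          · rw [emod_small _ N (by omega) (by omega)]
            split_ifs <;> omega
      have step : stepsLoopA city2 direction N (fuel + 1) city1 steps
          = stepsLoopA city2 direction N fuel city1' (steps + 1) := by
        simp [stepsLoopA, hne, hc1']
      rw [step, ih city1' (steps + 1) key.1.1 key.1.2 (by omega)]
      omega

-- One loop step seen by B's formula, for an arbitrary starting city1 that is not
-- congruent to city2: the remaining step count drops by exactly one.
theorem step_modR (c1 c2 N : Int) (hN : 0 < N) (hnd : ¬ (N ∣ c2 - c1)) :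
    (c2 - (c1 + 1) % N) % N = (c2 - c1) % N - 1 ∧ 1 ≤ (c2 - c1) % N := by
  have hN2 : 1 < N := by
    by_contra h
    exact hnd (by rw [show N = 1 by omega]; exact one_dvd _)
  have ht0 : 0 ≤ (c2 - c1) % N := Int.emod_nonneg _ (by omega)
  have ht1 : (c2 - c1) % N ≠ 0 := fun h => hnd (Int.dvd_of_emod_eq_zero h)
  have htN : (c2 - c1) % N < N := Int.emod_lt_of_pos _ hN
  have e1 : (c2 - (c1 + 1) % N) % N = (c2 - (c1 + 1)) % N := by
    conv_lhs => rw [Int.sub_emod]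
    conv_rhs => rw [Int.sub_emod]
    rw [Int.emod_emod_of_dvd _ dvd_rfl]
  have e2 : (c2 - (c1 + 1)) % N = ((c2 - c1) % N - 1) % N := by
    conv_lhs => rw [show c2 - (c1 + 1) = c2 - c1 - 1 by ring, Int.sub_emod]
    conv_rhs => rw [Int.sub_emod]
    rw [Int.emod_emod_of_dvd _ dvd_rfl]
  refine ⟨?_, by omega⟩
  rw [e1, e2, Int.emod_eq_of_lt (by omega) (by omega)]

theorem step_modL (c1 c2 N : Int) (hN : 0 < N) (hnd : ¬ (N ∣ c1 - c2)) :
    ((c1 - 1 + N) % N - c2) % N = (c1 - c2) % N - 1 ∧ 1 ≤ (c1 - c2) % N := by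
  have hN2 : 1 < N := by
    by_contra h
    exact hnd (by rw [show N = 1 by omega]; exact one_dvd _)
  have ht0 : 0 ≤ (c1 - c2) % N := Int.emod_nonneg _ (by omega)
  have ht1 : (c1 - c2) % N ≠ 0 := fun h => hnd (Int.dvd_of_emod_eq_zero h)
  have htN : (c1 - c2) % N < N := Int.emod_lt_of_pos _ hN
  have e1 : ((c1 - 1 + N) % N - c2) % N = (c1 - 1 + N - c2) % N := by
    conv_lhs => rw [Int.sub_emod]
    conv_rhs => rw [Int.sub_emod]
    rw [Int.emod_emod_of_dvd _ dvd_rfl]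
  have e2 : (c1 - 1 + N - c2) % N = ((c1 - c2) % N - 1) % N := by
    conv_lhs =>
      rw [show c1 - 1 + N - c2 = c1 - c2 - 1 + N * 1 by ring,
          Int.add_mul_emod_self_left, Int.sub_emod]
    conv_rhs => rw [Int.sub_emod]
    rw [Int.emod_emod_of_dvd _ dvd_rfl]
  refine ⟨?_, by omega⟩
  rw [e1, e2, Int.emod_eq_of_lt (by omega) (by omega)]

-- ===== VERDICT (by name: the statement is the Claim_ definition above) =====
theorem steps_by_juarez_spec : Claim_equal_steps_by_juarez := by
  intro city1 city2 direction N _ hpre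
  unfold Spec_steps_by_juarez steps_by_juarez
  rcases hpre with ⟨heq, hN0⟩ | ⟨hN, h3, h4, hnd⟩
  · -- city1 = city2: the loop exits at once, B's formula gives 0 % N = 0
    subst heq
    have hB : steps_by_juarez_alt city1 city1 direction N = 0 := by
      unfold steps_by_juarez_alt
      split <;> simp [PySem.Int.mod]
    rw [hB]
    cases N.toNat <;> simp [stepsLoopA]
  · -- positive ring, target in range, city1 not congruent to city2
    have hne : city1 ≠ city2 := by
      intro h; exact hnd (by rw [h]; simp)
    have hmod : ∀ a : Int, PySem.Int.mod a N = a % N :=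
      fun a => PySem.Int.mod_eq_emod_of_pos hN
    obtain ⟨m, hm⟩ : ∃ m, N.toNat = m + 1 := ⟨N.toNat - 1, by omega⟩
    set city1' : Int :=
      if direction == "R" then PySem.Int.mod (city1 + 1) N
      else PySem.Int.mod (city1 - 1 + N) N with hc1'
    have step1 : stepsLoopA city2 direction N N.toNat city1 0
        = stepsLoopA city2 direction N m city1' 1 := by
      rw [hm]; simp [stepsLoopA, hne, hc1']
    have key : (0 ≤ city1' ∧ city1' < N) ∧
        steps_by_juarez_alt city1' city2 direction N
          = steps_by_juarez_alt city1 city2 direction N - 1 ∧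
        1 ≤ steps_by_juarez_alt city1 city2 direction N := by
      unfold steps_by_juarez_alt
      by_cases hd : direction == "R"
      · simp only [hc1', if_pos hd, hmod _]
        refine ⟨⟨Int.emod_nonneg _ (by omega), Int.emod_lt_of_pos _ hN⟩, ?_⟩
        exact step_modR city1 city2 N hN hnd
      · simp only [hc1', if_neg hd, hmod _]
        refine ⟨⟨Int.emod_nonneg _ (by omega), Int.emod_lt_of_pos _ hN⟩, ?_⟩
        exact step_modL city1 city2 N hN (fun h => hnd (dvd_sub_comm.mp h))
    have hlt : steps_by_juarez_alt city1 city2 direction N < N := by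
      unfold steps_by_juarez_alt
      split <;> exact PySem.Int.mod_lt _ hN
    have := stepsLoopA_eq city2 direction N hN h3 h4 m city1' 1 key.1.1 key.1.2
      (by omega)
    omega
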